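-- pv_equiv track=rewrite | github.com/automl/neps | neps/space/neps_spaces/string_formatter.py | _collapse_closing_brackets
-- ===== SOURCE A (Python) =====
-- def _collapse_closing_brackets(text: str) -> str:
--     """Collapse consecutive closing brackets onto same line respecting indentation.
--
--     Transforms:
--            )
--            )
--         )
--     Into:
--         ) ) )
--
--     All brackets are placed on the same line using the minimum indentation.
--
--     Args:
--         text: The formatted text
--
--     Returns:
--         Text with collapsed closing brackets
--     """
--     lines = text.split("\n")
--     result = []
--     i = 0
--
--     while i < len(lines):
--         current_line = lines[i]
--         stripped = current_line.strip()
--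
--         # Check if this line contains only closing brackets
--         if stripped and all(c in ")]" for c in stripped):
--             # Collect consecutive bracket lines
--             bracket_lines = [current_line]
--             j = i + 1
--             while (
--                 j < len(lines)
--                 and lines[j].strip()
--                 and all(c in ")]" for c in lines[j].strip())
--             ):
--                 bracket_lines.append(lines[j])
--                 j += 1
--
--             # Collapse if multiple bracket lines
--             if len(bracket_lines) > 1:
--                 # Find minimum indentation
--                 min_indent = min(len(line) - len(line.lstrip()) for line in bracket_lines)
--                 # Collapse onto single line
--                 combined = " ".join(line.strip() for line in bracket_lines)
--                 result.append(" " * min_indent + combined)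
--             else:
--                 result.append(current_line)
--
--             i = j
--         else:
--             result.append(current_line)
--             i += 1
--
--     return "\n".join(result)
-- ===== SOURCE B (Python) =====
-- def _collapse_closing_brackets(text: str) -> str:
--     """Collapse consecutive closing-bracket-only lines onto one line (group-then-render)."""
--     def is_bracket_line(line):
--         s = line.strip()
--         return bool(s) and all(c in ")]" for c in s)
--
--     groups = []
--     for line in text.split("\n"):
--         k = is_bracket_line(line)
--         if groups and groups[-1][0] == k:
--             groups[-1][1].append(line)
--         else:
--             groups.append((k, [line]))
--
--     out = []
--     for key, group in groups:
--         if key and len(group) > 1: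
--             min_indent = min(len(l) - len(l.lstrip()) for l in group)
--             out.append(" " * min_indent + " ".join(l.strip() for l in group))
--         else:
--             out.extend(group)
--     return "\n".join(out)
-- ===== Notes on version B (the rewrite author's own statement) =====
-- stated objective: alternative
-- what changed: Replaces A's index-based two-pointer scan (outer while with an inner while collecting each bracket run) by a partition-then-render decomposition: one fold groups the lines into maximal runs of equal is_bracket_line key, then a separate pass renders each group (collapse multi-line bracket groups, copy everything else).
import Mathlib
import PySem

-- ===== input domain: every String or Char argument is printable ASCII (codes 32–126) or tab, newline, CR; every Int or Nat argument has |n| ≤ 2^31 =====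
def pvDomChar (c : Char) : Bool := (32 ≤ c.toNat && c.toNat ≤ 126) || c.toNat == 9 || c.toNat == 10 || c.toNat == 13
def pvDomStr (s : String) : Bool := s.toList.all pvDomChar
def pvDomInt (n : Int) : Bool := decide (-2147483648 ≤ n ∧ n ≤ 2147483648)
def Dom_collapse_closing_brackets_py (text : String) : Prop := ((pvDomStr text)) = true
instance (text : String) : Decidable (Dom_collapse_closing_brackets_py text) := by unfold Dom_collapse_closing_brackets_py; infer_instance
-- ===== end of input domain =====

-- B replaces A's two-pointer scan by a group-by-key fold plus a render pass; same O(n) cost (objective: alternative).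

-- ===== PORT A =====
-- A: outer while over lines (ported as recursion on the remaining suffix), inner while
-- collecting the consecutive bracket lines; lines are handled as List Char via PySem.Chars.

def pvA_isBr (c : Char) : Bool := c == ')' || c == ']'

def pvA_indent (l : List Char) : Nat := l.length - (PySem.Chars.lstrip l).length

-- inner while: collect consecutive bracket lines into bracket_lines, return rest at j
def pvA_collect : List (List Char) → List (List Char) → List (List Char) × List (List Char)
  | [], acc => (acc, [])
  | l :: rest, acc =>
      if PySem.Chars.strip l ≠ [] ∧ (PySem.Chars.strip l).all pvA_isBr = true then
        pvA_collect rest (acc ++ [l])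
      else (acc, l :: rest)

theorem pvA_collect_len : ∀ (ls acc : List (List Char)), (pvA_collect ls acc).2.length ≤ ls.length := by
  intro ls
  induction ls with
  | nil => intro acc; simp [pvA_collect]
  | cons l rest ih =>
      intro acc
      simp only [pvA_collect]
      split
      · exact Nat.le_trans (ih _) (Nat.le_succ _)
      · simp

-- min(len(line) - len(line.lstrip()) for line in bracket_lines), as Python's running min
def pvA_minIndent : List (List Char) → Nat
  | [] => 0
  | h :: t => t.foldl (fun m x => Nat.min m (pvA_indent x)) (pvA_indent h)

def pvA_loop : List (List Char) → List (List Char)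
  | [] => []
  | l :: rest =>
      let stripped := PySem.Chars.strip l
      if stripped ≠ [] ∧ stripped.all pvA_isBr = true then
        let p := pvA_collect rest [l]
        (if 1 < p.1.length then
          [List.replicate (pvA_minIndent p.1) ' ' ++
            PySem.Chars.join [' '] (p.1.map PySem.Chars.strip)]
        else [l]) ++ pvA_loop p.2
      else l :: pvA_loop rest
  termination_by ls => ls.length
  decreasing_by
  · exact Nat.lt_succ_of_le (pvA_collect_len rest [l])
  · simp

def collapse_closing_brackets_py (text : String) : String :=
  String.ofList (PySem.Chars.join ['\n']
    (pvA_loop (PySem.Chars.splitOn text.toList ['\n'])))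

-- ===== PORT B =====
-- B: one fold builds maximal runs of equal key (append to the last group or open a new
-- one), then a render pass maps each group to its output lines.

def pvB_key (l : List Char) : Bool :=
  let s := PySem.Chars.strip l
  !s.isEmpty && s.all (fun c => c == ')' || c == ']')

def pvB_step (gs : List (Bool × List (List Char))) (l : List Char) :
    List (Bool × List (List Char)) :=
  let k := pvB_key l
  match gs.getLast? with
  | some g => if g.1 == k then gs.dropLast ++ [(k, g.2 ++ [l])] else gs ++ [(k, [l])]
  | none => [(k, [l])]

def pvB_render (g : Bool × List (List Char)) : List (List Char) :=
  if g.1 && decide (1 < g.2.length) then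
    [List.replicate (((g.2.map (fun l => l.length - (PySem.Chars.lstrip l).length)).min?).getD 0) ' ' ++
      PySem.Chars.join [' '] (g.2.map PySem.Chars.strip)]
  else g.2

def collapse_closing_brackets_py_alt (text : String) : String :=
  String.ofList (PySem.Chars.join ['\n']
    (((PySem.Chars.splitOn text.toList ['\n']).foldl pvB_step []).flatMap pvB_render))

-- ===== PRECONDITION & SPEC =====
def Spec_collapse_closing_brackets_py (text : String) (out : String) : Prop := out = collapse_closing_brackets_py_alt text
instance (text : String) (out : String) : Decidable (Spec_collapse_closing_brackets_py text out) := by unfold Spec_collapse_closing_brackets_py; infer_instance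

-- ===== CLAIM (what is proved, stated in full; the proofs are below) =====
def Claim_equal_collapse_closing_brackets_py : Prop := ∀ (text : String), Dom_collapse_closing_brackets_py text → Spec_collapse_closing_brackets_py text (collapse_closing_brackets_py text)

-- ===== LEMMAS AND PROOFS =====

-- span-based grouping: the common intermediate form both programs are related to
def pvSg : List (List Char) → List (Bool × List (List Char))
  | [] => []
  | l :: rest =>
      let k := pvB_key l
      let p := rest.span (fun x => pvB_key x == k)
      (k, l :: p.1) :: pvSg p.2
  termination_by ls => ls.length
  decreasing_by
    simp only [List.span_eq_takeWhile_dropWhile]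
    exact Nat.lt_succ_of_le (List.length_dropWhile_le _ rest)

theorem pvSg_cons (l : List Char) (rest : List (List Char)) :
    pvSg (l :: rest) = (pvB_key l, l :: rest.takeWhile (fun x => pvB_key x == pvB_key l)) ::
      pvSg (rest.dropWhile (fun x => pvB_key x == pvB_key l)) := by
  rw [pvSg]; simp [List.span_eq_takeWhile_dropWhile]

def pvSgFrom (k : Bool) (run : List (List Char)) (ls : List (List Char)) :
    List (Bool × List (List Char)) :=
  let p := ls.span (fun x => pvB_key x == k)
  (k, run ++ p.1) :: pvSg p.2

theorem pvA_cond_iff (l : List Char) :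
    (PySem.Chars.strip l ≠ [] ∧ (PySem.Chars.strip l).all pvA_isBr = true) ↔ pvB_key l = true := by
  simp only [pvB_key, Bool.and_eq_true, Bool.not_eq_eq_eq_not, Bool.not_true]
  constructor
  · rintro ⟨h1, h2⟩; exact ⟨by simpa using h1, h2⟩
  · rintro ⟨h1, h2⟩; exact ⟨by simpa using h1, h2⟩

theorem pvA_collect_spec : ∀ (ls acc : List (List Char)),
    pvA_collect ls acc = (acc ++ ls.takeWhile pvB_key, ls.dropWhile pvB_key) := by
  intro ls
  induction ls with
  | nil => intro acc; simp [pvA_collect]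
  | cons l rest ih =>
      intro acc
      simp only [pvA_collect]
      by_cases hk : pvB_key l = true
      · rw [if_pos ((pvA_cond_iff l).mpr hk), ih]
        simp [hk]
      · rw [if_neg (fun h => hk ((pvA_cond_iff l).mp h))]
        simp [hk]

theorem pvMin_eq (h : List Char) (t : List (List Char)) :
    (((h :: t).map (fun l => l.length - (PySem.Chars.lstrip l).length)).min?).getD 0
      = pvA_minIndent (h :: t) := by
  simp only [pvA_minIndent, List.map_cons, List.min?_cons', Option.getD_some]
  rw [List.foldl_map]
  rfl

theorem pvA_eq_sg : ∀ (n : Nat) (ls : List (List Char)), ls.length ≤ n →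
    pvA_loop ls = (pvSg ls).flatMap pvB_render := by
  intro n
  induction n with
  | zero => intro ls h; rw [List.length_eq_zero_iff.mp (Nat.le_zero.mp h)]; simp [pvA_loop, pvSg]
  | succ n ih =>
      intro ls h
      match ls with
      | [] => simp [pvA_loop, pvSg]
      | l :: rest =>
        have hr : rest.length ≤ n := by simpa using h
        by_cases hk : pvB_key l = true
        · rw [pvA_loop, if_pos ((pvA_cond_iff l).mpr hk), pvA_collect_spec]
          have hsp : rest.span (fun x => pvB_key x == pvB_key l)
              = (rest.takeWhile pvB_key, rest.dropWhile pvB_key) := by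
            rw [List.span_eq_takeWhile_dropWhile, hk]
            simp
          rw [pvSg, hsp]
          simp only [List.flatMap_cons]
          rw [← ih (rest.dropWhile pvB_key)
              (Nat.le_trans (List.length_dropWhile_le pvB_key rest) hr)]
          congr 1
          simp only [pvB_render, hk, Bool.true_and, List.singleton_append,
            List.length_cons, decide_eq_true_eq]
          by_cases hlen : 1 < (rest.takeWhile pvB_key).length + 1
          · rw [if_pos (by simpa using hlen), if_pos (by simpa using hlen)]
            rw [pvMin_eq]
          · rw [if_neg (by simpa using hlen), if_neg (by simpa using hlen)]
            have : rest.takeWhile pvB_key = [] := by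
              cases htw : rest.takeWhile pvB_key with
              | nil => rfl
              | cons a b => exfalso; apply hlen; rw [htw]; simp
            rw [this]
        · rw [pvA_loop, if_neg (fun hc => hk ((pvA_cond_iff l).mp hc)), ih rest hr]
          have hkf : pvB_key l = false := Bool.not_eq_true _ |>.mp hk
          rw [pvSg, hkf]
          simp only [List.flatMap_cons, pvB_render, Bool.false_and, if_neg Bool.false_ne_true]
          match rest with
          | [] => simp [pvSg]
          | r :: rs =>
            by_cases hkr : pvB_key r = true
            · simp [List.span_eq_takeWhile_dropWhile, hkr]
            · have hkrf : pvB_key r = false := Bool.not_eq_true _ |>.mp hkr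
              conv_lhs => rw [pvSg, hkrf]
              simp only [List.span_eq_takeWhile_dropWhile, List.flatMap_cons, pvB_render,
                Bool.false_and, if_neg Bool.false_ne_true]
              simp [hkrf]

theorem pvB_gen : ∀ (ls : List (List Char)) (gs : List (Bool × List (List Char)))
    (k : Bool) (run : List (List Char)),
    ls.foldl pvB_step (gs ++ [(k, run)]) = gs ++ pvSgFrom k run ls := by
  intro ls
  induction ls with
  | nil => intro gs k run; simp [pvSgFrom, pvSg]
  | cons l rest ih =>
      intro gs k run
      simp only [List.foldl_cons]
      have hstep : pvB_step (gs ++ [(k, run)]) l =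
          if k == pvB_key l then gs ++ [(pvB_key l, run ++ [l])]
          else (gs ++ [(k, run)]) ++ [(pvB_key l, [l])] := by
        simp [pvB_step]
      by_cases hk : pvB_key l = k
      · rw [hstep, if_pos (by simp [hk]), hk, ih]
        congr 1
        simp only [pvSgFrom, List.span_eq_takeWhile_dropWhile, List.takeWhile_cons,
          List.dropWhile_cons, hk]
        simp
      · rw [hstep, if_neg (by simp [Ne.symm hk]), ih]
        -- append the new singleton group
        simp only [List.append_assoc]
        congr 1
        simp [pvSgFrom, List.span_eq_takeWhile_dropWhile, hk, pvSg_cons]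

theorem pvB_eq_sg (ls : List (List Char)) :
    ls.foldl pvB_step [] = pvSg ls := by
  match ls with
  | [] => simp [pvSg]
  | l :: rest =>
    have : pvB_step [] l = [] ++ [(pvB_key l, [l])] := by simp [pvB_step]
    rw [List.foldl_cons, this, pvB_gen]
    conv_rhs => rw [pvSg]
    simp [pvSgFrom]

-- ===== VERDICT (by name: the statement is the Claim_ definition above) =====
theorem collapse_closing_brackets_py_spec : Claim_equal_collapse_closing_brackets_py := by
  intro text _
  unfold Spec_collapse_closing_brackets_py collapse_closing_brackets_py
    collapse_closing_brackets_py_alt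
  rw [pvB_eq_sg, pvA_eq_sg (PySem.Chars.splitOn text.toList ['\n']).length _ le_rfl]
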